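-- pv_equiv track=rewrite | github.com/SwiftExtender/scanlib | scanlib.py | links_ip_to_dns
-- ===== SOURCE A (Python) =====
-- def links_ip_to_dns(dnsx_output: list) -> dict:
--     ip_to_dns = dict()
--     for line in dnsx_output:
--         dns, ip = line.split()
--         ip = ip[1:-1]
--         if ip not in ip_to_dns.keys():
--             ip_to_dns[ip] = [dns]
--         else:
--             ip_to_dns[ip].append(dns)
--     return ip_to_dns
-- ===== SOURCE B (Python) =====
-- def links_ip_to_dns(dnsx_output: list) -> dict:
--     # Two-phase: parse all lines into (ip, dns) pairs first, then build the
--     # grouped dict by one scan per distinct ip (first-occurrence key order).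
--     pairs = []
--     for line in dnsx_output:
--         dns, ip = line.split()
--         pairs.append((ip[1:-1], dns))
--     ips = list(dict.fromkeys(ip for ip, _ in pairs))
--     return {ip: [dns for i, dns in pairs if i == ip] for ip in ips}
-- ===== Notes on version B (the rewrite author's own statement) =====
-- stated objective: alternative
-- what changed: A builds the dict incrementally with a membership test per line; B first parses all lines into (ip, dns) pairs, dedups the ips in first-occurrence order, and builds each group by a comprehension scan over the pair list.
import Mathlib
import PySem

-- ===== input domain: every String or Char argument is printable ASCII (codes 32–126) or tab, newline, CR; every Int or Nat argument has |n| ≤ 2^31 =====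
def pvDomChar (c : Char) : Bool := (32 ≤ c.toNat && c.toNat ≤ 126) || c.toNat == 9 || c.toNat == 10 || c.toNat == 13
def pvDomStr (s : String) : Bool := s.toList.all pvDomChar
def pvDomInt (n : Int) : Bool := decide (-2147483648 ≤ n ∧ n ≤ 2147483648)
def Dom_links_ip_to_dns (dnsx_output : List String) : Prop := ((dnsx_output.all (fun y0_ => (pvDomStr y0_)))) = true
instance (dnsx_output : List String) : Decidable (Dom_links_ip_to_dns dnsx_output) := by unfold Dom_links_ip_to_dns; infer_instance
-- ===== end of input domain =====

-- B groups by a parse-all / dedup-ips / scan-per-ip decomposition instead of A's incremental dict; equal on all inputs where A returns (Pre_ excludes lines that do not split into exactly two words, where Python's unpacking raises ValueError).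

-- ===== PORT A =====
-- one loop iteration of A; a line that does not split into exactly two words makes Python raise ValueError (excluded by Pre_; the port leaves the dict unchanged there)
def pvStepA (d : PySem.Dict String (List String)) (line : String) : PySem.Dict String (List String) :=
  match PySem.Str.split₀ line with
  | [dns, ip0] =>
    let ip := PySem.Str.slice ip0 (some 1) (some (-1))
    if d.contains ip = false then d.insert ip [dns] else d.modify ip [] (· ++ [dns])
  | _ => d

def links_ip_to_dns (dnsx_output : List String) : List (String × List String) :=
  (dnsx_output.foldl pvStepA PySem.Dict.empty).items

-- ===== PORT B =====
-- parse one line into its (ip, dns) pair; a malformed line raises in Python (excluded by Pre_; the port contributes nothing there)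
def pvParseB (line : String) : List (String × String) :=
  match PySem.Str.split₀ line with
  | [dns, ip0] => [(PySem.Str.slice ip0 (some 1) (some (-1)), dns)]
  | _ => []

def links_ip_to_dns_alt (dnsx_output : List String) : List (String × List String) :=
  let pairs := dnsx_output.foldl (fun acc line => acc ++ pvParseB line) []
  (PySem.List.dedup (pairs.map (·.1))).map
    (fun ip => (ip, (pairs.filter (fun p => p.1 == ip)).map (·.2)))

-- ===== PRECONDITION & SPEC =====
-- Pre_ excludes exactly the inputs containing a line that does not split into two whitespace-separated words: there Python's 'dns, ip = line.split()' raises ValueError.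
def Pre_links_ip_to_dns (dnsx_output : List String) : Prop :=
  ∀ line ∈ dnsx_output, (PySem.Str.split₀ line).length = 2
instance (dnsx_output : List String) : Decidable (Pre_links_ip_to_dns dnsx_output) := by unfold Pre_links_ip_to_dns; infer_instance

def pvWitness_links_ip_to_dns : List String := ["a [1.1.1.1]", "b [2.2.2.2]", "c [1.1.1.1]"]

def Spec_links_ip_to_dns (dnsx_output : List String) (out : List (String × List String)) : Prop := out = links_ip_to_dns_alt dnsx_output
instance (dnsx_output : List String) (out : List (String × List String)) : Decidable (Spec_links_ip_to_dns dnsx_output out) := by unfold Spec_links_ip_to_dns; infer_instance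

-- ===== CLAIM (what is proved, stated in full; the proofs are below) =====
def Claim_equal_links_ip_to_dns : Prop := ∀ (dnsx_output : List String), Dom_links_ip_to_dns dnsx_output → Pre_links_ip_to_dns dnsx_output → Spec_links_ip_to_dns dnsx_output (links_ip_to_dns dnsx_output)

-- ===== LEMMAS AND PROOFS =====
-- A's loop body is uniformly a 'modify … (· ++ [dns])' (the insert branch is the missing-key case of modify)
theorem pvStepA_eq_modify (d : PySem.Dict String (List String)) (line : String) :
    pvStepA d line = (pvParseB line).foldl (fun d p => d.modify p.1 [] (· ++ [p.2])) d := by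
  unfold pvStepA pvParseB
  cases h : PySem.Str.split₀ line with
  | nil => rfl
  | cons a t =>
    cases t with
    | nil => rfl
    | cons b t2 =>
      cases t2 with
      | nil =>
        simp only [List.foldl_cons, List.foldl_nil, PySem.Dict.modify]
        by_cases hc : (PySem.Dict.contains d (PySem.Str.slice b (some 1) (some (-1)))) = false
        · simp [hc, PySem.Dict.getD_of_not_contains d ([] : List String) hc]
        · simp [hc]
      | cons _ _ => rfl

-- fold A's per-line step over the lines = fold the dict step over B's parsed pair list
theorem foldA_eq_foldPairs (xs : List String) (d : PySem.Dict String (List String)) :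
    xs.foldl pvStepA d
      = (xs.flatMap pvParseB).foldl (fun d p => d.modify p.1 [] (· ++ [p.2])) d := by
  induction xs generalizing d with
  | nil => rfl
  | cons line rest ih =>
    simp only [List.foldl_cons, List.flatMap_cons, List.foldl_append]
    rw [pvStepA_eq_modify, ih]

theorem links_ip_to_dns_eq_alt (xs : List String) :
    links_ip_to_dns xs = links_ip_to_dns_alt xs := by
  simp only [links_ip_to_dns, links_ip_to_dns_alt]
  rw [PySem.List.foldl_append_eq_flatMap, List.nil_append]
  set pairs := xs.flatMap pvParseB with hp
  rw [foldA_eq_foldPairs]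
  have hkeys : (pairs.foldl (fun d p => d.modify p.1 [] (· ++ [p.2])) PySem.Dict.empty).keys
      = PySem.Set.ofList (pairs.map (·.1)) := by
    have := PySem.Dict.keys_foldl_modify_key pairs (·.1) ([] : List String)
      (fun _ p => (· ++ [p.2])) PySem.Dict.empty
    simpa [PySem.Set.update, PySem.Set.ofList, PySem.Dict.empty] using this
  rw [PySem.Dict.items_eq_map_keys _ (by rw [hkeys]; exact PySem.Set.nodup_ofList _) []]
  rw [hkeys, PySem.List.dedup_eq_ofList]
  apply List.map_congr_left
  intro ip _
  rw [PySem.Dict.getD_foldl_modify_append]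
  simp [PySem.Dict.empty, PySem.Dict.getD, PySem.Dict.get?]
  rw [← hp]

-- ===== VERDICT (by name: the statement is the Claim_ definition above) =====
theorem links_ip_to_dns_spec : Claim_equal_links_ip_to_dns := by
  intro xs _ _
  unfold Spec_links_ip_to_dns
  exact links_ip_to_dns_eq_alt xs
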